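-- pv_equiv track=rewrite | github.com/regix1/nvidia-docker-setup | nvidia_driver_setup/nvidia/drivers.py | _get_cuda_support
-- ===== SOURCE A (Python) =====
-- def _get_cuda_support(driver_version):
--     """Get supported CUDA versions for a driver version"""
--     # Extract major version number
--     try:
--         major_version = int(driver_version.split('.')[0])
--     except:
--         return []
--
--     cuda_support = {
--         590: ["13.0.0", "12.4.0", "12.3.2", "12.2.2", "12.1.1", "12.0.1", "11.8.0"],
--         580: ["13.0.0", "12.4.0", "12.3.2", "12.2.2", "12.1.1", "12.0.1", "11.8.0"],
--         570: ["12.8.0", "12.4.0", "12.3.2", "12.2.2", "12.1.1", "12.0.1", "11.8.0"],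
--         565: ["12.4.0", "12.3.2", "12.2.2", "12.1.1", "12.0.1", "11.8.0"],
--         560: ["12.3.2", "12.2.2", "12.1.1", "12.0.1", "11.8.0", "11.7.1"],
--         550: ["12.2.2", "12.1.1", "12.0.1", "11.8.0", "11.7.1", "11.6.2"],
--         535: ["12.0.1", "11.8.0", "11.7.1", "11.6.2"],
--         525: ["11.8.0", "11.7.1", "11.6.2"],
--         470: ["11.7.1", "11.6.2", "11.5.2"]
--     }
--
--     # Find the best match
--     for version_threshold in sorted(cuda_support.keys(), reverse=True):
--         if major_version >= version_threshold:
--             return cuda_support[version_threshold]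
--
--     return ["11.6.2"]  # Fallback for older drivers
-- ===== SOURCE B (Python) =====
-- def _get_cuda_support(driver_version):
--     """Get supported CUDA versions for a driver version"""
--     try:
--         major_version = int(driver_version.split('.')[0])
--     except:
--         return []
--
--     # thresholds ascending, values aligned by index
--     keys = [470, 525, 535, 550, 560, 565, 570, 580, 590]
--     values = [
--         ["11.7.1", "11.6.2", "11.5.2"],
--         ["11.8.0", "11.7.1", "11.6.2"],
--         ["12.0.1", "11.8.0", "11.7.1", "11.6.2"],
--         ["12.2.2", "12.1.1", "12.0.1", "11.8.0", "11.7.1", "11.6.2"],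
--         ["12.3.2", "12.2.2", "12.1.1", "12.0.1", "11.8.0", "11.7.1"],
--         ["12.4.0", "12.3.2", "12.2.2", "12.1.1", "12.0.1", "11.8.0"],
--         ["12.8.0", "12.4.0", "12.3.2", "12.2.2", "12.1.1", "12.0.1", "11.8.0"],
--         ["13.0.0", "12.4.0", "12.3.2", "12.2.2", "12.1.1", "12.0.1", "11.8.0"],
--         ["13.0.0", "12.4.0", "12.3.2", "12.2.2", "12.1.1", "12.0.1", "11.8.0"],
--     ]
--
--     # binary search: lo ends at bisect_right(keys, major_version)
--     lo, hi = 0, len(keys)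
--     while lo < hi:
--         mid = (lo + hi) // 2
--         if keys[mid] <= major_version:
--             lo = mid + 1
--         else:
--             hi = mid
--     if lo == 0:
--         return ["11.6.2"]  # fallback for older drivers
--     return values[lo - 1]
-- ===== Notes on version B (the rewrite author's own statement) =====
-- stated objective: alternative
-- what changed: Replaces the descending linear scan over the dict's sorted keys with a hand-written binary search (bisect_right) over an ascending threshold list aligned with a value table.
import Mathlib
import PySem

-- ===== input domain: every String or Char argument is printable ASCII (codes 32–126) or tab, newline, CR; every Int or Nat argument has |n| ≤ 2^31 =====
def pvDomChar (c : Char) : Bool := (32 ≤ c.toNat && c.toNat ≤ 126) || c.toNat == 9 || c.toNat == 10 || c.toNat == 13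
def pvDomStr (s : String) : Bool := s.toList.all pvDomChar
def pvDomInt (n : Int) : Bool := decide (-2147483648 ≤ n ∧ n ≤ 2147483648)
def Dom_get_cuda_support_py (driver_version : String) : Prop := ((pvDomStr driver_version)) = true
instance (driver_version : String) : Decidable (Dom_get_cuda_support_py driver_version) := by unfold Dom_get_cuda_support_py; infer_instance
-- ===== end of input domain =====

-- B replaces A's descending linear scan over sorted dict keys with a binary search
-- (bisect_right) over an ascending threshold list aligned with a value table (alternative).

-- ===== PORT A =====
def pvCudaDict : PySem.Dict Int (List String) :=
  PySem.Dict.ofList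
    [ (590, ["13.0.0", "12.4.0", "12.3.2", "12.2.2", "12.1.1", "12.0.1", "11.8.0"]),
      (580, ["13.0.0", "12.4.0", "12.3.2", "12.2.2", "12.1.1", "12.0.1", "11.8.0"]),
      (570, ["12.8.0", "12.4.0", "12.3.2", "12.2.2", "12.1.1", "12.0.1", "11.8.0"]),
      (565, ["12.4.0", "12.3.2", "12.2.2", "12.1.1", "12.0.1", "11.8.0"]),
      (560, ["12.3.2", "12.2.2", "12.1.1", "12.0.1", "11.8.0", "11.7.1"]),
      (550, ["12.2.2", "12.1.1", "12.0.1", "11.8.0", "11.7.1", "11.6.2"]),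
      (535, ["12.0.1", "11.8.0", "11.7.1", "11.6.2"]),
      (525, ["11.8.0", "11.7.1", "11.6.2"]),
      (470, ["11.7.1", "11.6.2", "11.5.2"]) ]

-- the for-loop over sorted(keys, reverse=True): first threshold ≤ major wins
def pvScanA (major : Int) : List Int → List String
  | [] => ["11.6.2"]  -- fallback for older drivers
  | k :: ks => if major ≥ k then PySem.Dict.getD pvCudaDict k [] else pvScanA major ks

def get_cuda_support_py (driver_version : String) : List String :=
  match PySem.Int.ofStr? (((PySem.Str.split? driver_version ".").getD []).headD "") with
  | none => []
  | some major =>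
      pvScanA major (PySem.List.sorted (PySem.Dict.keys pvCudaDict) (fun k => k) true)

-- ===== PORT B =====
def pvBKeys : List Int := [470, 525, 535, 550, 560, 565, 570, 580, 590]
def pvBVals : List (List String) :=
  [ ["11.7.1", "11.6.2", "11.5.2"],
    ["11.8.0", "11.7.1", "11.6.2"],
    ["12.0.1", "11.8.0", "11.7.1", "11.6.2"],
    ["12.2.2", "12.1.1", "12.0.1", "11.8.0", "11.7.1", "11.6.2"],
    ["12.3.2", "12.2.2", "12.1.1", "12.0.1", "11.8.0", "11.7.1"],
    ["12.4.0", "12.3.2", "12.2.2", "12.1.1", "12.0.1", "11.8.0"],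
    ["12.8.0", "12.4.0", "12.3.2", "12.2.2", "12.1.1", "12.0.1", "11.8.0"],
    ["13.0.0", "12.4.0", "12.3.2", "12.2.2", "12.1.1", "12.0.1", "11.8.0"],
    ["13.0.0", "12.4.0", "12.3.2", "12.2.2", "12.1.1", "12.0.1", "11.8.0"] ]

-- the while lo < hi loop of Source B (lo, hi stay in 0..len(keys), so Nat is exact)
def pvBsearch (major : Int) (lo hi : Nat) : Nat :=
  if h : lo < hi then
    let mid := (lo + hi) / 2
    if pvBKeys.getD mid 0 ≤ major then pvBsearch major (mid + 1) hi
    else pvBsearch major lo mid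
  else lo
termination_by hi - lo
decreasing_by all_goals omega

def get_cuda_support_py_alt (driver_version : String) : List String :=
  match PySem.Int.ofStr? (((PySem.Str.split? driver_version ".").getD []).headD "") with
  | none => []
  | some major =>
      let lo := pvBsearch major 0 pvBKeys.length
      if lo = 0 then ["11.6.2"]  -- fallback for older drivers
      else pvBVals.getD (lo - 1) []

-- ===== PRECONDITION & SPEC =====
def Spec_get_cuda_support_py (driver_version : String) (out : List String) : Prop := out = get_cuda_support_py_alt driver_version
instance (driver_version : String) (out : List String) : Decidable (Spec_get_cuda_support_py driver_version out) := by unfold Spec_get_cuda_support_py; infer_instance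

-- ===== CLAIM (what is proved, stated in full; the proofs are below) =====
def Claim_equal_get_cuda_support_py : Prop := ∀ (driver_version : String), Dom_get_cuda_support_py driver_version → Spec_get_cuda_support_py driver_version (get_cuda_support_py driver_version)

-- ===== LEMMAS AND PROOFS =====

theorem pvSortedKeys :
    PySem.List.sorted (PySem.Dict.keys pvCudaDict) (fun k => k) true
      = [590, 580, 570, 565, 560, 550, 535, 525, 470] := by decide

theorem pvCore_eq (m : Int) :
    pvScanA m [590, 580, 570, 565, 560, 550, 535, 525, 470]
      = (let lo := pvBsearch m 0 pvBKeys.length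
         if lo = 0 then ["11.6.2"] else pvBVals.getD (lo - 1) []) := by
  by_cases h590 : (590 : Int) ≤ m
  · simp [pvScanA, pvBsearch, pvBKeys, (by omega : (590 : Int) ≤ m), (by omega : (580 : Int) ≤ m), (by omega : (560 : Int) ≤ m)]; decide
  by_cases h580 : (580 : Int) ≤ m
  · simp [pvScanA, pvBsearch, pvBKeys, (by omega : ¬ (590 : Int) ≤ m), (by omega : (580 : Int) ≤ m), (by omega : (560 : Int) ≤ m)]; decide
  by_cases h570 : (570 : Int) ≤ m
  · simp [pvScanA, pvBsearch, pvBKeys, (by omega : ¬ (590 : Int) ≤ m), (by omega : ¬ (580 : Int) ≤ m), (by omega : (570 : Int) ≤ m), (by omega : (560 : Int) ≤ m)]; decide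
  by_cases h565 : (565 : Int) ≤ m
  · simp [pvScanA, pvBsearch, pvBKeys, (by omega : ¬ (590 : Int) ≤ m), (by omega : ¬ (580 : Int) ≤ m), (by omega : ¬ (570 : Int) ≤ m), (by omega : (565 : Int) ≤ m), (by omega : (560 : Int) ≤ m)]; decide
  by_cases h560 : (560 : Int) ≤ m
  · simp [pvScanA, pvBsearch, pvBKeys, (by omega : ¬ (590 : Int) ≤ m), (by omega : ¬ (580 : Int) ≤ m), (by omega : ¬ (570 : Int) ≤ m), (by omega : ¬ (565 : Int) ≤ m), (by omega : (560 : Int) ≤ m)]; decide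
  by_cases h550 : (550 : Int) ≤ m
  · simp [pvScanA, pvBsearch, pvBKeys, (by omega : ¬ (590 : Int) ≤ m), (by omega : ¬ (580 : Int) ≤ m), (by omega : ¬ (570 : Int) ≤ m), (by omega : ¬ (565 : Int) ≤ m), (by omega : ¬ (560 : Int) ≤ m), (by omega : (550 : Int) ≤ m), (by omega : (535 : Int) ≤ m)]; decide
  by_cases h535 : (535 : Int) ≤ m
  · simp [pvScanA, pvBsearch, pvBKeys, (by omega : ¬ (590 : Int) ≤ m), (by omega : ¬ (580 : Int) ≤ m), (by omega : ¬ (570 : Int) ≤ m), (by omega : ¬ (565 : Int) ≤ m), (by omega : ¬ (560 : Int) ≤ m), (by omega : ¬ (550 : Int) ≤ m), (by omega : (535 : Int) ≤ m)]; decide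
  by_cases h525 : (525 : Int) ≤ m
  · simp [pvScanA, pvBsearch, pvBKeys, (by omega : ¬ (590 : Int) ≤ m), (by omega : ¬ (580 : Int) ≤ m), (by omega : ¬ (570 : Int) ≤ m), (by omega : ¬ (565 : Int) ≤ m), (by omega : ¬ (560 : Int) ≤ m), (by omega : ¬ (550 : Int) ≤ m), (by omega : ¬ (535 : Int) ≤ m), (by omega : (525 : Int) ≤ m)]; decide
  by_cases h470 : (470 : Int) ≤ m
  · simp [pvScanA, pvBsearch, pvBKeys, (by omega : ¬ (590 : Int) ≤ m), (by omega : ¬ (580 : Int) ≤ m), (by omega : ¬ (570 : Int) ≤ m), (by omega : ¬ (565 : Int) ≤ m), (by omega : ¬ (560 : Int) ≤ m), (by omega : ¬ (550 : Int) ≤ m), (by omega : ¬ (535 : Int) ≤ m), (by omega : ¬ (525 : Int) ≤ m), (by omega : (470 : Int) ≤ m)]; decide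
  · simp [pvScanA, pvBsearch, pvBKeys, h590, h580, h570, h565, h560, h550, h535, h525, h470]

-- ===== VERDICT (by name: the statement is the Claim_ definition above) =====
theorem get_cuda_support_py_spec : Claim_equal_get_cuda_support_py := by
  intro dv _
  unfold Spec_get_cuda_support_py get_cuda_support_py get_cuda_support_py_alt
  cases PySem.Int.ofStr? (((PySem.Str.split? dv ".").getD []).headD "") with
  | none => rfl
  | some m => simpa [pvSortedKeys] using pvCore_eq m
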